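-- pv_equiv track=rewrite | github.com/aelaguiz/rally | src/rally/services/agent_skill_validation.py | _extract_agent_skill_names
-- ===== SOURCE A (Python) =====
-- _SKILLS_SECTION_PREFIX = "## Skills"
--
-- _SKILL_HEADING_PREFIX = "### "
--
-- def _extract_agent_skill_names(markdown_text: str) -> tuple[str, ...]:
--     skill_names: list[str] = []
--     in_skills_section = False
--     for raw_line in markdown_text.splitlines():
--         if raw_line.startswith("## "):
--             in_skills_section = raw_line.strip().startswith(_SKILLS_SECTION_PREFIX)
--             continue
--         if not in_skills_section:
--             continue
--         if raw_line.startswith(_SKILL_HEADING_PREFIX):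
--             skill_names.append(raw_line[len(_SKILL_HEADING_PREFIX) :].strip())
--     return tuple(skill_names)
-- ===== SOURCE B (Python) =====
-- _SKILLS_SECTION_PREFIX = "## Skills"
--
-- _SKILL_HEADING_PREFIX = "### "
--
--
-- def _extract_agent_skill_names(markdown_text: str) -> tuple[str, ...]:
--     # Pass 1: group the lines into '## '-headed sections (ordered, duplicates kept);
--     # lines before the first heading are dropped.
--     sections: list[tuple[str, list[str]]] = []
--     for line in markdown_text.splitlines():
--         if line.startswith("## "):
--             sections.append((line, []))
--         elif sections:
--             sections[-1][1].append(line)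
--     # Pass 2: collect skill names from every Skills section, in order.
--     names: list[str] = []
--     for heading, body in sections:
--         if heading.strip().startswith(_SKILLS_SECTION_PREFIX):
--             names.extend(
--                 line[len(_SKILL_HEADING_PREFIX):].strip()
--                 for line in body
--                 if line.startswith(_SKILL_HEADING_PREFIX)
--             )
--     return tuple(names)
-- ===== Notes on version B (the rewrite author's own statement) =====
-- stated objective: alternative
-- what changed: B replaces A's single stateful scan with a flag by a two-pass decomposition: first group lines into ordered (heading, body) sections, then collect '### ' names from every section whose heading matches '## Skills'.
import Mathlib
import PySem

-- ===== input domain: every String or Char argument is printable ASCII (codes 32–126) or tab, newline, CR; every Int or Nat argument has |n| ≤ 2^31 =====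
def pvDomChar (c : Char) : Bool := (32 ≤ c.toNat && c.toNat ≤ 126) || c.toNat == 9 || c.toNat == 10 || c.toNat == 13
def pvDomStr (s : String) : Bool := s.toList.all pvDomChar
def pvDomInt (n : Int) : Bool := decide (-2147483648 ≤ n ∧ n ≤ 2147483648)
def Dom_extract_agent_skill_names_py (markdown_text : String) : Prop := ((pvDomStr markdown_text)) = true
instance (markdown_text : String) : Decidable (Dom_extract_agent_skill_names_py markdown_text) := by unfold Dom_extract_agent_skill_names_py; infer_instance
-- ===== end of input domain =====

-- B replaces A's single stateful scan (a flag) by a two-pass decomposition: group lines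
-- into ordered (heading, body) sections, then collect names from matching sections.


-- ===== PORT A =====
-- one pass: flag tracks whether we are inside a '## Skills' section
def pvAStep (st : List String × Bool) (raw_line : String) : List String × Bool :=
  if PySem.Str.startswith raw_line "## " then
    (st.1, PySem.Str.startswith (PySem.Str.strip raw_line) "## Skills")
  else if st.2 = false then st
  else if PySem.Str.startswith raw_line "### " then
    (st.1 ++ [PySem.Str.strip (PySem.Str.slice raw_line (some 4) none)], st.2)
  else st

def extract_agent_skill_names_py (markdown_text : String) : List String :=
  ((PySem.Str.splitlines markdown_text).foldl pvAStep ([], false)).1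

-- ===== PORT B =====
-- pass 1: build the ordered section list (cons + final reverse = the Python append loop)
def pvBStep (secs : List (String × List String)) (line : String) :
    List (String × List String) :=
  if PySem.Str.startswith line "## " then (line, []) :: secs
  else
    match secs with
    | [] => []
    | (h, b) :: rest => (h, b ++ [line]) :: rest

-- pass 2 helper: the comprehension over one section's body
def pvBodyNames (body : List String) : List String :=
  body.filterMap (fun line =>
    if PySem.Str.startswith line "### " then
      some (PySem.Str.strip (PySem.Str.slice line (some 4) none))
    else none)

def extract_agent_skill_names_py_alt (markdown_text : String) : List String :=
  let sections := ((PySem.Str.splitlines markdown_text).foldl pvBStep []).reverse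
  (sections.filter (fun s => PySem.Str.startswith (PySem.Str.strip s.1) "## Skills")).flatMap
    (fun s => pvBodyNames s.2)

-- ===== PRECONDITION & SPEC =====
def Spec_extract_agent_skill_names_py (markdown_text : String) (out : List String) : Prop := out = extract_agent_skill_names_py_alt markdown_text
instance (markdown_text : String) (out : List String) : Decidable (Spec_extract_agent_skill_names_py markdown_text out) := by unfold Spec_extract_agent_skill_names_py; infer_instance

-- ===== CLAIM (what is proved, stated in full; the proofs are below) =====
def Claim_equal_extract_agent_skill_names_py : Prop := ∀ (markdown_text : String), Dom_extract_agent_skill_names_py markdown_text → Spec_extract_agent_skill_names_py markdown_text (extract_agent_skill_names_py markdown_text)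

-- ===== LEMMAS AND PROOFS =====

-- the names B extracts from a (reversed) section accumulator
def pvC (secs : List (String × List String)) : List String :=
  (secs.reverse.filter (fun s => PySem.Str.startswith (PySem.Str.strip s.1) "## Skills")).flatMap
    (fun s => pvBodyNames s.2)

-- A's flag, read off from B's accumulator
def pvFlag : List (String × List String) → Bool
  | [] => false
  | (h, _) :: _ => PySem.Str.startswith (PySem.Str.strip h) "## Skills"

lemma pvC_cons (h : String) (b : List String) (rest : List (String × List String)) :
    pvC ((h, b) :: rest) =
      pvC rest ++ (if PySem.Str.startswith (PySem.Str.strip h) "## Skills"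
                   then pvBodyNames b else []) := by
  simp [pvC, List.filter_append, List.flatMap_append]
  split_ifs with hh <;> simp [hh]

lemma pvBodyNames_append (b : List String) (l : String) :
    pvBodyNames (b ++ [l]) =
      pvBodyNames b ++ (if PySem.Str.startswith l "### "
                        then [PySem.Str.strip (PySem.Str.slice l (some 4) none)] else []) := by
  simp [pvBodyNames]
  split_ifs with hl <;> simp [hl]

lemma pvStep_eq (line : String) (secs : List (String × List String)) :
    pvAStep (pvC secs, pvFlag secs) line =
      (pvC (pvBStep secs line), pvFlag (pvBStep secs line)) := by
  by_cases hh : PySem.Str.startswith line "## " = true <;> simp at hh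
  · simp [pvAStep, pvBStep, hh, pvC_cons, pvFlag, pvBodyNames]
  · cases secs with
    | nil => simp [pvAStep, pvBStep, hh, pvFlag, pvC]
    | cons s rest =>
      obtain ⟨h, b⟩ := s
      by_cases hs : PySem.Str.startswith (PySem.Str.strip h) "## Skills" = true <;>
        simp at hs
      · by_cases hl : PySem.Str.startswith line "### " = true <;> simp at hl <;>
          simp [pvAStep, pvBStep, hh, hs, hl, pvFlag, pvC_cons, pvBodyNames_append]
      · simp [pvAStep, pvBStep, hh, hs, pvFlag, pvC_cons]

lemma pvMain (lines : List String) :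
    ∀ secs : List (String × List String),
      lines.foldl pvAStep (pvC secs, pvFlag secs) =
        (pvC (lines.foldl pvBStep secs), pvFlag (lines.foldl pvBStep secs)) := by
  induction lines with
  | nil => intro secs; simp
  | cons l ls ih =>
    intro secs
    simp only [List.foldl_cons, pvStep_eq l secs]
    exact ih (pvBStep secs l)

-- ===== VERDICT (by name: the statement is the Claim_ definition above) =====
theorem extract_agent_skill_names_py_spec : Claim_equal_extract_agent_skill_names_py := by
  intro t _
  show extract_agent_skill_names_py t = extract_agent_skill_names_py_alt t
  have h := pvMain (PySem.Str.splitlines t) []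
  simp only [extract_agent_skill_names_py, extract_agent_skill_names_py_alt]
  have h0 : (pvC [], pvFlag []) = (([] : List String), false) := by simp [pvC, pvFlag]
  rw [← h0, h]
  rfl
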